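-- pv_equiv track=rewrite | github.com/Jared-Hagadorns-Organization/Daily_Briefing_Email_v2 | src/nodes/synthesize.py | _render_news_items
-- ===== SOURCE A (Python) =====
-- from typing import Any
--
-- def _render_news_items(news_items: list[dict[str, Any]]) -> str:
--     if not news_items:
--         return ""
--     topic_labels = {"national": "National", "finance": "Finance", "tech": "Tech"}
--     grouped: dict[str, list[dict[str, Any]]] = {}
--     for item in news_items:
--         topic = item.get("topic", "national")
--         grouped.setdefault(topic, []).append(item)
--
--     parts = []
--     for topic in ["national", "finance", "tech"]:
--         if topic not in grouped:
--             continue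
--         parts.append(f"<h3>{topic_labels.get(topic, topic.title())}</h3><ul>")
--         for item in grouped[topic]:
--             url = item.get("url", "")
--             headline = item.get("headline", "")
--             summary = item.get("summary", "")
--             link = f'<a href="{url}">{headline}</a>' if url else headline
--             parts.append(f"<li>{link}<br><span style='font-size:0.9em'>{summary}</span></li>")
--         parts.append("</ul>")
--     return "\n".join(parts)
-- ===== SOURCE B (Python) =====
-- def _li(item):
--     url = item.get("url", "")
--     headline = item.get("headline", "")
--     summary = item.get("summary", "")
--     link = f'<a href="{url}">{headline}</a>' if url else headline
--     return f"<li>{link}<br><span style='font-size:0.9em'>{summary}</span></li>"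
--
--
-- def _render_news_items(news_items):
--     if not news_items:
--         return ""
--     parts = []
--     for topic, label in [("national", "National"), ("finance", "Finance"), ("tech", "Tech")]:
--         selected = [it for it in news_items if it.get("topic", "national") == topic]
--         if not selected:
--             continue
--         parts.append(f"<h3>{label}</h3><ul>")
--         parts.extend(_li(it) for it in selected)
--         parts.append("</ul>")
--     return "\n".join(parts)
-- ===== Notes on version B (the rewrite author's own statement) =====
-- stated objective: simpler
-- what changed: Drops the grouping dict and its first pass entirely: B loops over a fixed (topic, label) pair list and selects each section's items with one filtering comprehension, rendering <li> lines via a helper.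
import Mathlib
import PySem

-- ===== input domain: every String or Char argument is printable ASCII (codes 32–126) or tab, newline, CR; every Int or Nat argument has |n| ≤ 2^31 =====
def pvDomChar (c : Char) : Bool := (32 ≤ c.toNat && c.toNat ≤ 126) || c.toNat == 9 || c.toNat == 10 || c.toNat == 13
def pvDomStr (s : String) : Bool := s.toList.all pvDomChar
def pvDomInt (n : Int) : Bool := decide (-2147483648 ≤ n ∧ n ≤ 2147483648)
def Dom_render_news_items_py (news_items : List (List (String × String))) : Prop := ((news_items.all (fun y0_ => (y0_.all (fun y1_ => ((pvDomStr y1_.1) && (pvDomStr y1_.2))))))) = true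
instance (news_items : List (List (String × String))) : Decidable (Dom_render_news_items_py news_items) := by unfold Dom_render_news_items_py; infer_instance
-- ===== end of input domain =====

-- B drops A's grouping dict: it filters the item list once per fixed topic instead (return value only; neither mutates).

-- ===== PORT A =====
-- item.get(k, dflt): first-match lookup in the item's association list
def aGet (item : List (String × String)) (k dflt : String) : String :=
  (PySem.Dict.mk item).getD k dflt

-- hand port of str.title(), exact on the ASCII domain (cased chars are exactly the alpha ones);
-- only reachable as the (never used) fallback of topic_labels.get
def titleChars : List Char → Bool → List Char
  | [], _ => []
  | c :: cs, prevAlpha =>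
    if PySem.Chars.isalpha c then
      (if prevAlpha then PySem.Chars.lowerChar c else PySem.Chars.upperChar c) :: titleChars cs true
    else c :: titleChars cs false

def titleStr (s : String) : String := String.ofList (titleChars s.toList false)

def render_news_items_py (news_items : List (List (String × String))) : String :=
  if news_items = [] then "" else
  let topic_labels : PySem.Dict String String :=
    PySem.Dict.ofList [("national", "National"), ("finance", "Finance"), ("tech", "Tech")]
  let grouped : PySem.Dict String (List (List (String × String))) :=
    news_items.foldl (fun d item => d.modify (aGet item "topic" "national") [] (· ++ [item]))
      PySem.Dict.empty
  let parts :=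
    ["national", "finance", "tech"].foldl (fun parts topic =>
      if grouped.contains topic = false then parts else
      let parts := parts ++ ["<h3>" ++ topic_labels.getD topic (titleStr topic) ++ "</h3><ul>"]
      -- grouped[topic]: the contains-guard above makes getD exact here (no KeyError possible)
      let parts := (grouped.getD topic []).foldl (fun parts item =>
        let url := aGet item "url" ""
        let headline := aGet item "headline" ""
        let summary := aGet item "summary" ""
        let link := if url ≠ "" then "<a href=\"" ++ url ++ "\">" ++ headline ++ "</a>" else headline
        parts ++ ["<li>" ++ link ++ "<br><span style='font-size:0.9em'>" ++ summary ++ "</span></li>"]) parts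
      parts ++ ["</ul>"]) []
  PySem.Str.join "\n" parts

-- ===== PORT B =====
def bGet (item : List (String × String)) (k dflt : String) : String :=
  (PySem.Dict.mk item).getD k dflt

def bLi (item : List (String × String)) : String :=
  let url := bGet item "url" ""
  let headline := bGet item "headline" ""
  let summary := bGet item "summary" ""
  let link := if url ≠ "" then "<a href=\"" ++ url ++ "\">" ++ headline ++ "</a>" else headline
  "<li>" ++ link ++ "<br><span style='font-size:0.9em'>" ++ summary ++ "</span></li>"

def render_news_items_py_alt (news_items : List (List (String × String))) : String :=
  if news_items = [] then "" else
  let parts :=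
    [("national", "National"), ("finance", "Finance"), ("tech", "Tech")].foldl (fun parts tl =>
      let selected := news_items.filter (fun it => bGet it "topic" "national" == tl.1)
      if selected = [] then parts else
      parts ++ ["<h3>" ++ tl.2 ++ "</h3><ul>"] ++ selected.map bLi ++ ["</ul>"]) []
  PySem.Str.join "\n" parts

-- ===== PRECONDITION & SPEC =====
def Spec_render_news_items_py (news_items : List (List (String × String))) (out : String) : Prop := out = render_news_items_py_alt news_items
instance (news_items : List (List (String × String))) (out : String) : Decidable (Spec_render_news_items_py news_items out) := by unfold Spec_render_news_items_py; infer_instance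

-- ===== CLAIM (what is proved, stated in full; the proofs are below) =====
def Claim_equal_render_news_items_py : Prop := ∀ (news_items : List (List (String × String))), Dom_render_news_items_py news_items → Spec_render_news_items_py news_items (render_news_items_py news_items)

-- ===== LEMMAS AND PROOFS =====

-- invariant of A's grouping loop: the entry at t collects, in order, exactly the items whose topic is t
lemma grouped_getD (l : List (List (String × String)))
    (d : PySem.Dict String (List (List (String × String)))) (t : String) :
    (l.foldl (fun d item => d.modify (aGet item "topic" "national") [] (· ++ [item])) d).getD t []
    = d.getD t [] ++ l.filter (fun it => aGet it "topic" "national" == t) := by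
  induction l generalizing d with
  | nil => simp
  | cons it rest ih =>
    simp only [List.foldl_cons, List.filter_cons]
    rw [ih, PySem.Dict.getD_modify]
    by_cases h : t = aGet it "topic" "national"
    · simp [h, List.append_assoc]
    · have hbq : (aGet it "topic" "national" == t) = false := by
        simpa using fun hh => h hh.symm
      simp [h, hbq]

-- invariant of A's grouping loop: membership of t is "some item has topic t"
lemma grouped_contains (l : List (List (String × String)))
    (d : PySem.Dict String (List (List (String × String)))) (t : String) :
    (l.foldl (fun d item => d.modify (aGet item "topic" "national") [] (· ++ [item])) d).contains t
    = (d.contains t || l.any (fun it => aGet it "topic" "national" == t)) := by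
  induction l generalizing d with
  | nil => simp
  | cons it rest ih =>
    simp only [List.foldl_cons, List.any_cons]
    rw [ih, PySem.Dict.contains_modify]
    by_cases h : t = aGet it "topic" "national"
    · simp [h]
    · have : (t == aGet it "topic" "national") = false := by simpa using h
      have h2 : (aGet it "topic" "national" == t) = false := by
        simpa using fun hh => h hh.symm
      simp [this, h2]

theorem render_news_items_py_spec_aux (news_items : List (List (String × String))) :
    render_news_items_py news_items = render_news_items_py_alt news_items := by
  unfold render_news_items_py render_news_items_py_alt
  by_cases hn : news_items = []
  · simp [hn]
  · have hb : bGet = aGet := rfl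
    have hfilt : ∀ t : String,
        (news_items.filter (fun it => aGet it "topic" "national" == t) = [])
        ↔ (news_items.any (fun it => aGet it "topic" "national" == t)) = false := by
      intro t
      simp only [List.filter_eq_nil_iff, List.any_eq_false]
    have hN : (PySem.Dict.ofList [("national", "National"), ("finance", "Finance"), ("tech", "Tech")]).getD
        "national" (titleStr "national") = "National" := rfl
    have hF : (PySem.Dict.ofList [("national", "National"), ("finance", "Finance"), ("tech", "Tech")]).getD
        "finance" (titleStr "finance") = "Finance" := rfl
    have hT : (PySem.Dict.ofList [("national", "National"), ("finance", "Finance"), ("tech", "Tech")]).getD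
        "tech" (titleStr "tech") = "Tech" := rfl
    simp only [hn, ite_false, hb, List.foldl_cons, List.foldl_nil, hN, hF, hT,
      grouped_contains, grouped_getD, PySem.Dict.contains_empty, PySem.Dict.getD_empty,
      Bool.false_or, List.nil_append, PySem.List.foldl_append_singleton_eq_map]
    have hbLi : bLi = (fun item =>
        "<li>" ++
          (if aGet item "url" "" ≠ "" then
            "<a href=\"" ++ aGet item "url" "" ++ "\">" ++ aGet item "headline" "" ++ "</a>"
          else aGet item "headline" "") ++
          "<br><span style='font-size:0.9em'>" ++ aGet item "summary" "" ++ "</span></li>") := by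
      funext it
      rfl
    simp only [hbLi]
    have hcond : ∀ t : String,
        (List.filter (fun it => aGet it "topic" "national" == t) news_items = [])
        = ((news_items.any fun it => aGet it "topic" "national" == t) = false) :=
      fun t => propext (hfilt t)
    simp only [hcond, List.append_assoc, List.cons_append, List.nil_append]

-- ===== VERDICT (by name: the statement is the Claim_ definition above) =====
theorem render_news_items_py_spec : Claim_equal_render_news_items_py := by
  intro news_items _
  exact render_news_items_py_spec_aux news_items
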